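-- pv_equiv track=rewrite | github.com/shahed-shd/MyDraftWorks | PythonCodes/pytest/main.py | bfs
-- ===== SOURCE A (Python) =====
-- from collections import deque
--
-- def bfs(adjList):
--     q = deque()
--     n = len(adjList)
--     vis = [False] * n
--
--     q.append(0)
--     vis[0] = True
--
--     while True:
--         try:
--             u_idx = q.popleft()
--         except:
--             break
--
--         for v_idx in adjList[u_idx]:
--             if not vis[v_idx]:
--                 vis[v_idx] = True;
--                 q.append(v_idx)
--
--     return (False not in vis)
-- ===== SOURCE B (Python) =====
-- def bfs(adjList):
--     n = len(adjList)
--     vis = [False] * n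
--     vis[0] = True
--     changed = True
--     while changed:
--         changed = False
--         for u in range(n):
--             if vis[u]:
--                 for v in adjList[u]:
--                     if not vis[v]:
--                         vis[v] = True
--                         changed = True
--     return (False not in vis)
-- ===== Notes on version B (the rewrite author's own statement) =====
-- stated objective: alternative
-- what changed: Replaced the deque-based BFS (queue of discovered nodes) with a round-based transitive-closure sweep: repeatedly scan all nodes and mark every neighbour of an already-marked node until a full pass changes nothing.
-- outside the precondition, e.g. on bfs([[0], [5]]): A returns False, B returns False; on bfs([[5]]): A raises IndexError, B raises IndexError; on bfs([]): A raises IndexError, B raises IndexError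
import Mathlib
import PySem

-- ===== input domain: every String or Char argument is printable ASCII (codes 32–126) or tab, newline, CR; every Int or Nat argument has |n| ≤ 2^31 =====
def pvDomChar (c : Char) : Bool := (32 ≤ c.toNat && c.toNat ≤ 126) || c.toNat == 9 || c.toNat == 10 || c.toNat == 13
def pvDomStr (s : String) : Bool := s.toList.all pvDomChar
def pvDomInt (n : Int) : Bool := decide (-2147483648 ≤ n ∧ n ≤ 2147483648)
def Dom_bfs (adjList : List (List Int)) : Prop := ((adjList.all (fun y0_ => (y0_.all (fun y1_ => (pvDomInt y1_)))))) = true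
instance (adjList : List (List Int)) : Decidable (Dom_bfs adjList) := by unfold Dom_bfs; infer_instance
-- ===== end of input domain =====

-- B replaces the deque-based BFS by a round-based closure sweep (repeat whole-graph passes
-- marking neighbours of marked nodes until a pass changes nothing); equivalence of the RETURN
-- value is proved on Pre_bfs (nonempty list, every entry a valid possibly-negative index).

-- ===== PORT A =====
-- inner 'for v_idx in adjList[u_idx]' loop: state is (vis, queue)
def bfsStep (vis : List Bool) (q : List Int) (row : List Int) : List Bool × List Int :=
  row.foldl (fun s v =>
    if PySem.List.pyGetD s.1 v false = false then
      (PySem.List.pySetD s.1 v true, s.2 ++ [v])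
    else s) (vis, q)

-- 'while True: u_idx = q.popleft() …'; fuel is only a totality guard: under Pre_bfs the
-- queue empties before the fuel (one unit per pop, at most n pops happen) runs out
def bfsLoop (adjList : List (List Int)) : Nat → List Bool → List Int → List Bool
  | 0, vis, _ => vis
  | _ + 1, vis, [] => vis
  | fuel + 1, vis, u :: q =>
    let s := bfsStep vis q (PySem.List.pyGetD adjList u [])
    bfsLoop adjList fuel s.1 s.2

def bfs (adjList : List (List Int)) : Bool :=
  let n := adjList.length
  let vis := PySem.List.pySetD (List.replicate n false) 0 true  -- vis = [False]*n; vis[0] = True (raises on n = 0: outside Pre_)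
  !((bfsLoop adjList n vis [0]).contains false)                 -- q = [0]; loop; return (False not in vis)

-- ===== PORT B =====
-- inner 'for v in adjList[u]' loop: state is (vis, changed)
def sweepRow (s : List Bool × Bool) (row : List Int) : List Bool × Bool :=
  row.foldl (fun s v =>
    if PySem.List.pyGetD s.1 v false = false then
      (PySem.List.pySetD s.1 v true, true)
    else s) s

-- one 'for u in range(n)' pass, started with changed = False
def sweep (adjList : List (List Int)) (vis : List Bool) : List Bool × Bool :=
  (PySem.List.pyRange 0 adjList.length 1).foldl (fun s u =>
    if PySem.List.pyGetD s.1 u false = true then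
      sweepRow s (PySem.List.pyGetD adjList u [])
    else s) (vis, false)

-- 'while changed:'; fuel is only a totality guard: under Pre_bfs each continued pass has
-- strictly fewer False entries, so at most n passes run
def sweepLoop (adjList : List (List Int)) : Nat → List Bool → List Bool
  | 0, vis => vis
  | fuel + 1, vis =>
    let s := sweep adjList vis
    if s.2 then sweepLoop adjList fuel s.1 else s.1

def bfs_alt (adjList : List (List Int)) : Bool :=
  let n := adjList.length
  let vis := PySem.List.pySetD (List.replicate n false) 0 true
  !((sweepLoop adjList n vis).contains false)

-- ===== PRECONDITION & SPEC =====
-- A raises IndexError on [] (vis[0]) and whenever BFS reads vis[v] for an entry v outside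
-- [-n, n-1].  Pre_ is deliberately a little narrower than A's return set: A also returns when
-- out-of-range entries occur only in rows BFS never reaches, but reachability is not a
-- closed-form condition, so Pre_ requires EVERY entry to be a valid (possibly negative) index.
def Pre_bfs (adjList : List (List Int)) : Prop :=
  adjList ≠ [] ∧ ∀ row ∈ adjList, ∀ v ∈ row,
    -(adjList.length : Int) ≤ v ∧ v < (adjList.length : Int)
instance (adjList : List (List Int)) : Decidable (Pre_bfs adjList) := by
  unfold Pre_bfs; infer_instance

def pvWitness_bfs : List (List Int) := [[1], [0, -2]]

def Spec_bfs (adjList : List (List Int)) (out : Bool) : Prop := out = bfs_alt adjList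
instance (adjList : List (List Int)) (out : Bool) : Decidable (Spec_bfs adjList out) := by
  unfold Spec_bfs; infer_instance

-- ===== CLAIM (what is proved, stated in full; the proofs are below) =====
def Claim_equal_bfs : Prop := ∀ (adjList : List (List Int)), Dom_bfs adjList → Pre_bfs adjList → Spec_bfs adjList (bfs adjList)

-- ===== LEMMAS AND PROOFS =====

-- Python's index normalisation for a list of length n and an in-range index v
def nrm (n : ℕ) (v : Int) : ℕ := (if v < 0 then v + n else v).toNat

-- reading vis[i] for a ℕ index (total, default False)
def vget (vis : List Bool) (i : ℕ) : Bool := vis.getD i false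

-- the (normalised) out-neighbours of node u
def nbrs (adjList : List (List Int)) (u : ℕ) : List ℕ :=
  (adjList.getD u []).map (nrm adjList.length)

-- reachability from node 0 along directed edges (with Python's negative-index wrap)
inductive Reach (adjList : List (List Int)) : ℕ → Prop
  | zero : Reach adjList 0
  | step (u v : ℕ) : Reach adjList u → v ∈ nbrs adjList u → Reach adjList v

lemma nrm_lt {n : ℕ} {v : Int} (h1 : -(n : Int) ≤ v) (h2 : v < n) : nrm n v < n := by
  unfold nrm; split <;> omega

lemma getD_bridge {α : Type} {n : ℕ} (xs : List α) (hlen : xs.length = n) (v : Int)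
    (h1 : -(n : Int) ≤ v) (h2 : v < n) (d : α) :
    PySem.List.pyGetD xs v d = xs.getD (nrm n v) d := by
  subst hlen
  simp only [PySem.List.pyGetD, PySem.List.pyGet?, PySem.List.pyIdx?, nrm,
    List.getD_eq_getElem?_getD]
  split <;> rename_i h
  · simp only [if_neg (by omega : ¬ v < 0), Option.bind_some]
  · split <;> rename_i h'
    · simp only [Option.bind_some]
      congr 2
      omega
    · omega

lemma setD_bridge {α : Type} {n : ℕ} (xs : List α) (hlen : xs.length = n) (v : Int)
    (h1 : -(n : Int) ≤ v) (h2 : v < n) (b : α) :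
    PySem.List.pySetD xs v b = xs.set (nrm n v) b := by
  subst hlen
  simp only [PySem.List.pySetD, PySem.List.pySet?, PySem.List.pyIdx?, nrm]
  split <;> rename_i h
  · simp only [if_neg (by omega : ¬ v < 0), Option.map_some, Option.getD_some]
  · split <;> rename_i h'
    · simp only [Option.map_some, Option.getD_some]
      congr 2
      omega
    · omega

lemma vget_set_self (xs : List Bool) (j : ℕ) (b : Bool) (hj : j < xs.length) :
    vget (xs.set j b) j = b := by
  simp [vget, List.getD_eq_getElem?_getD, hj]

lemma vget_set_ne (xs : List Bool) (j i : ℕ) (b : Bool) (h : i ≠ j) :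
    vget (xs.set j b) i = vget xs i := by
  simp [vget, List.getD_eq_getElem?_getD, List.getElem?_set_ne (by omega : j ≠ i)]

lemma count_false_set (xs : List Bool) (j : ℕ) (hj : j < xs.length)
    (hx : vget xs j = false) :
    (xs.set j true).count false + 1 = xs.count false := by
  induction xs generalizing j with
  | nil => simp at hj
  | cons x t ih =>
    cases j with
    | zero =>
      simp [vget] at hx
      simp [hx]
    | succ j =>
      have := ih j (by simpa using hj) (by simpa [vget] using hx)
      have hset : (x :: t).set (j + 1) true = x :: t.set j true := rfl
      rw [hset]
      simp only [List.count_cons]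
      omega

lemma count_false_zero (xs : List Bool) (h : xs.count false = 0) (i : ℕ) (hi : i < xs.length) :
    vget xs i = true := by
  have hmem : xs[i] ∈ xs := List.getElem_mem hi
  have : xs[i] ≠ false := by
    intro hf
    have := List.count_pos_iff.mpr (hf ▸ hmem)
    omega
  simp [vget, List.getD_eq_getElem?_getD, List.getElem?_eq_getElem hi]
  simpa using this

lemma vget_true_lt (xs : List Bool) (i : ℕ) (h : vget xs i = true) : i < xs.length := by
  by_contra hc
  rw [vget, List.getD_eq_getElem?_getD, List.getElem?_eq_none_iff.mpr (by omega)] at h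
  simp at h

-- under Pre_, every reachable node is < n
lemma reach_lt {adjList : List (List Int)}
    (hn : 0 < adjList.length)
    (hB : ∀ row ∈ adjList, ∀ v ∈ row, -(adjList.length : Int) ≤ v ∧ v < (adjList.length : Int))
    {i : ℕ} (h : Reach adjList i) : i < adjList.length := by
  induction h with
  | zero => exact hn
  | step u v hu hv ih =>
    unfold nbrs at hv
    rcases List.mem_map.mp hv with ⟨w, hw, rfl⟩
    by_cases hu' : u < adjList.length
    · have hrow : adjList.getD u [] ∈ adjList := by
        rw [List.getD_eq_getElem?_getD, List.getElem?_eq_getElem hu']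
        exact List.getElem_mem hu'
      rcases hB _ hrow _ hw with ⟨h1, h2⟩
      exact nrm_lt h1 h2
    · rw [List.getD_eq_getElem?_getD, List.getElem?_eq_none_iff.mpr (by omega)] at hw
      simp at hw

-- row of a node, under Pre_
lemma row_mem {adjList : List (List Int)} {u : ℕ} (hu : u < adjList.length) :
    adjList.getD u [] ∈ adjList := by
  rw [List.getD_eq_getElem?_getD, List.getElem?_eq_getElem hu]
  exact List.getElem_mem hu

-- ===== A-side: the inner fold =====
lemma stepA_spec {n : ℕ} (row : List Int)
    (hrow : ∀ v ∈ row, -(n : Int) ≤ v ∧ v < (n : Int)) :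
    ∀ (vis : List Bool) (q : List Int), vis.length = n →
      (bfsStep vis q row).1.length = n ∧
      (∀ i, vget vis i = true → vget (bfsStep vis q row).1 i = true) ∧
      (∀ v ∈ row, vget (bfsStep vis q row).1 (nrm n v) = true) ∧
      (∃ t, (bfsStep vis q row).2 = q ++ t ∧ (∀ w ∈ t, w ∈ row) ∧
        (∀ i, vget (bfsStep vis q row).1 i = true →
          vget vis i = true ∨ ∃ v ∈ t, nrm n v = i)) ∧
      ((bfsStep vis q row).1.count false + (bfsStep vis q row).2.length
        = vis.count false + q.length) := by
  induction row with
  | nil =>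
    intro vis q hlen
    refine ⟨hlen, fun i h => h, by simp, ⟨[], by simp [bfsStep], by simp, fun i h => Or.inl h⟩, by simp [bfsStep]⟩
  | cons v row ih =>
    intro vis q hlen
    obtain ⟨hv1, hv2⟩ := hrow v (List.mem_cons_self)
    have hrow' : ∀ w ∈ row, -(n : Int) ≤ w ∧ w < (n : Int) :=
      fun w hw => hrow w (List.mem_cons_of_mem _ hw)
    have hbridge : PySem.List.pyGetD vis v false = vget vis (nrm n v) :=
      getD_bridge vis hlen v hv1 hv2 false
    have hj : nrm n v < n := nrm_lt hv1 hv2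
    by_cases hcase : vget vis (nrm n v) = false
    · have hunfold : bfsStep vis q (v :: row)
          = bfsStep (vis.set (nrm n v) true) (q ++ [v]) row := by
        simp only [bfsStep, List.foldl_cons, hbridge, hcase, if_pos,
          setD_bridge vis hlen v hv1 hv2]
      have hlen' : (vis.set (nrm n v) true).length = n := by simp [hlen]
      obtain ⟨c1, c2, c3, ⟨t, ht1, ht2, ht3⟩, c5⟩ := ih hrow' (vis.set (nrm n v) true) (q ++ [v]) hlen'
      have hmono : ∀ i, vget vis i = true → vget (vis.set (nrm n v) true) i = true := by
        intro i hi
        by_cases hij : i = nrm n v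
        · subst hij; rw [vget_set_self _ _ _ (by omega)]
        · rw [vget_set_ne _ _ _ _ hij]; exact hi
      refine ⟨by rw [hunfold]; exact c1, ?_, ?_, ?_, ?_⟩
      · intro i hi; rw [hunfold]; exact c2 i (hmono i hi)
      · intro w hw
        rw [hunfold]
        rcases List.mem_cons.mp hw with rfl | hw'
        · exact c2 _ (by rw [vget_set_self _ _ _ (by omega)])
        · exact c3 w hw'
      · refine ⟨v :: t, ?_, ?_, ?_⟩
        · rw [hunfold, ht1]; simp
        · intro w hw
          rcases List.mem_cons.mp hw with rfl | hw'
          · exact List.mem_cons_self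
          · exact List.mem_cons_of_mem _ (ht2 w hw')
        · intro i hi
          rw [hunfold] at hi
          rcases ht3 i hi with hold | ⟨w, hw, hwi⟩
          · by_cases hij : i = nrm n v
            · exact Or.inr ⟨v, List.mem_cons_self, hij.symm⟩
            · rw [vget_set_ne _ _ _ _ hij] at hold; exact Or.inl hold
          · exact Or.inr ⟨w, List.mem_cons_of_mem _ hw, hwi⟩
      · rw [hunfold]
        have hcount := count_false_set vis (nrm n v) (by omega) hcase
        rw [c5]
        simp only [List.length_append, List.length_cons, List.length_nil]
        omega
    · have htrue : vget vis (nrm n v) = true := by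
        cases h : vget vis (nrm n v)
        · exact absurd h hcase
        · rfl
      have hunfold : bfsStep vis q (v :: row) = bfsStep vis q row := by
        simp only [bfsStep, List.foldl_cons, hbridge, htrue]
        simp
      obtain ⟨c1, c2, c3, ⟨t, ht1, ht2, ht3⟩, c5⟩ := ih hrow' vis q hlen
      refine ⟨by rw [hunfold]; exact c1, by rw [hunfold]; exact c2, ?_, ?_, by rw [hunfold]; exact c5⟩
      · intro w hw
        rw [hunfold]
        rcases List.mem_cons.mp hw with rfl | hw'
        · exact c2 _ htrue
        · exact c3 w hw'
      · exact ⟨t, by rw [hunfold]; exact ht1,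
          fun w hw => List.mem_cons_of_mem _ (ht2 w hw), by rw [hunfold]; exact ht3⟩

-- ===== A-side: the queue loop =====
lemma loopA_spec {adjList : List (List Int)}
    (hn : 0 < adjList.length)
    (hB : ∀ row ∈ adjList, ∀ v ∈ row, -(adjList.length : Int) ≤ v ∧ v < (adjList.length : Int)) :
    ∀ (fuel : ℕ) (vis : List Bool) (q : List Int),
      vis.length = adjList.length →
      fuel = vis.count false + q.length →
      vget vis 0 = true →
      (∀ i, vget vis i = true → Reach adjList i) →
      (∀ u ∈ q, -(adjList.length : Int) ≤ u ∧ u < (adjList.length : Int)) →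
      (∀ u ∈ q, Reach adjList (nrm adjList.length u)) →
      (∀ x, vget vis x = true →
        (∃ w ∈ q, nrm adjList.length w = x) ∨ ∀ v ∈ nbrs adjList x, vget vis v = true) →
      ((bfsLoop adjList fuel vis q).length = adjList.length ∧
        ∀ i, vget (bfsLoop adjList fuel vis q) i = true ↔ Reach adjList i) := by
  intro fuel
  induction fuel with
  | zero =>
    intro vis q hlen hfuel hI0 hsound hqB hqR hcomp
    have hcount : vis.count false = 0 := by omega
    refine ⟨by simpa [bfsLoop] using hlen, fun i => ⟨fun h => ?_, fun h => ?_⟩⟩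
    · exact hsound i (by simpa [bfsLoop] using h)
    · have := reach_lt hn hB h
      simpa [bfsLoop] using count_false_zero vis hcount i (by omega)
  | succ fuel ih =>
    intro vis q hlen hfuel hI0 hsound hqB hqR hcomp
    cases q with
    | nil =>
      have hclosed : ∀ x, vget vis x = true → ∀ v ∈ nbrs adjList x, vget vis v = true := by
        intro x hx
        rcases hcomp x hx with ⟨w, hw, _⟩ | h
        · simp at hw
        · exact h
      have hred : bfsLoop adjList (fuel + 1) vis [] = vis := rfl
      rw [hred]
      refine ⟨hlen, fun i => ⟨fun h => hsound i h, fun h => ?_⟩⟩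
      induction h with
      | zero => exact hI0
      | step u v hu hv ihv => exact hclosed u ihv v hv
    | cons u q' =>
      obtain ⟨hu1, hu2⟩ := hqB u List.mem_cons_self
      have hun : nrm adjList.length u < adjList.length := nrm_lt hu1 hu2
      have hrowdef : PySem.List.pyGetD adjList u []
          = adjList.getD (nrm adjList.length u) [] :=
        getD_bridge adjList rfl u hu1 hu2 []
      set row := PySem.List.pyGetD adjList u [] with hrow_eq
      have hrowB : ∀ v ∈ row, -(adjList.length : Int) ≤ v ∧ v < (adjList.length : Int) := by
        intro v hv
        rw [hrowdef] at hv
        exact hB _ (row_mem hun) v hv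
      have hnbrs : nbrs adjList (nrm adjList.length u) = row.map (nrm adjList.length) := by
        rw [nbrs, ← hrowdef]
      obtain ⟨c1, c2, c3, ⟨t, ht1, ht2, ht3⟩, c5⟩ := stepA_spec row hrowB vis q' hlen
      set s := bfsStep vis q' row with hs_eq
      have hred : bfsLoop adjList (fuel + 1) vis (u :: q') = bfsLoop adjList fuel s.1 s.2 := rfl
      rw [hred]
      have hRu : Reach adjList (nrm adjList.length u) := hqR u List.mem_cons_self
      have hsteppers : ∀ w ∈ t, Reach adjList (nrm adjList.length w) := by
        intro w hw
        exact Reach.step _ _ hRu (by rw [hnbrs]; exact List.mem_map_of_mem (ht2 w hw))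
      refine ih s.1 s.2 c1 (by have h5 := c5; simp only [List.length_cons] at hfuel; omega) (c2 0 hI0) ?_ ?_ ?_ ?_
      · intro i hi
        rcases ht3 i hi with hold | ⟨w, hw, hwi⟩
        · exact hsound i hold
        · exact hwi ▸ hsteppers w hw
      · intro w hw
        rw [ht1] at hw
        rcases List.mem_append.mp hw with hw' | hw'
        · exact hqB w (List.mem_cons_of_mem _ hw')
        · exact hrowB w (ht2 w hw')
      · intro w hw
        rw [ht1] at hw
        rcases List.mem_append.mp hw with hw' | hw'
        · exact hqR w (List.mem_cons_of_mem _ hw')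
        · exact hsteppers w hw'
      · intro x hx
        rcases ht3 x hx with hold | ⟨w, hw, hwi⟩
        · rcases hcomp x hold with ⟨w, hw, hwx⟩ | hcl
          · rcases List.mem_cons.mp hw with rfl | hw'
            · refine Or.inr ?_
              intro v hv
              rw [← hwx, hnbrs] at hv
              rcases List.mem_map.mp hv with ⟨w', hw', rfl⟩
              exact c3 w' hw'
            · exact Or.inl ⟨w, by rw [ht1]; exact List.mem_append_left _ hw', hwx⟩
          · exact Or.inr fun v hv => c2 v (hcl v hv)
        · exact Or.inl ⟨w, by rw [ht1]; exact List.mem_append_right _ hw, hwi⟩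

-- ===== B-side: the inner fold =====
lemma rowB_spec {n : ℕ} (row : List Int)
    (hrow : ∀ v ∈ row, -(n : Int) ≤ v ∧ v < (n : Int)) :
    ∀ (vis : List Bool) (c : Bool), vis.length = n →
      (sweepRow (vis, c) row).1.length = n ∧
      (∀ i, vget vis i = true → vget (sweepRow (vis, c) row).1 i = true) ∧
      (∀ v ∈ row, vget (sweepRow (vis, c) row).1 (nrm n v) = true) ∧
      (∀ i, vget (sweepRow (vis, c) row).1 i = true →
        vget vis i = true ∨ ∃ v ∈ row, nrm n v = i) ∧
      ((sweepRow (vis, c) row).2 = false → (sweepRow (vis, c) row).1 = vis ∧ c = false) ∧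
      ((sweepRow (vis, c) row).2 = c ∨
        ((sweepRow (vis, c) row).2 = true ∧
          (sweepRow (vis, c) row).1.count false < vis.count false)) ∧
      (sweepRow (vis, c) row).1.count false ≤ vis.count false := by
  induction row with
  | nil =>
    intro vis c hlen
    exact ⟨hlen, fun i h => h, by simp, fun i h => Or.inl h, by intro h; exact ⟨rfl, h⟩,
      Or.inl rfl, le_refl _⟩
  | cons v row ih =>
    intro vis c hlen
    obtain ⟨hv1, hv2⟩ := hrow v (List.mem_cons_self)
    have hrow' : ∀ w ∈ row, -(n : Int) ≤ w ∧ w < (n : Int) :=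
      fun w hw => hrow w (List.mem_cons_of_mem _ hw)
    have hbridge : PySem.List.pyGetD vis v false = vget vis (nrm n v) :=
      getD_bridge vis hlen v hv1 hv2 false
    have hj : nrm n v < n := nrm_lt hv1 hv2
    by_cases hcase : vget vis (nrm n v) = false
    · have hunfold : sweepRow (vis, c) (v :: row)
          = sweepRow (vis.set (nrm n v) true, true) row := by
        simp only [sweepRow, List.foldl_cons, hbridge, hcase, if_pos,
          setD_bridge vis hlen v hv1 hv2]
      have hlen' : (vis.set (nrm n v) true).length = n := by simp [hlen]
      obtain ⟨c1, c2, c3, c4, c5, c6, c7⟩ := ih hrow' (vis.set (nrm n v) true) true hlen'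
      have hcount := count_false_set vis (nrm n v) (by omega) hcase
      have hmono : ∀ i, vget vis i = true → vget (vis.set (nrm n v) true) i = true := by
        intro i hi
        by_cases hij : i = nrm n v
        · subst hij; rw [vget_set_self _ _ _ (by omega)]
        · rw [vget_set_ne _ _ _ _ hij]; exact hi
      have hs2 : (sweepRow (vis.set (nrm n v) true, true) row).2 = true := by
        rcases c6 with h | ⟨h, _⟩ <;> exact h
      rw [hunfold]
      refine ⟨c1, fun i hi => c2 i (hmono i hi), ?_, ?_, ?_, ?_, by omega⟩
      · intro w hw
        rcases List.mem_cons.mp hw with rfl | hw'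
        · exact c2 _ (by rw [vget_set_self _ _ _ (by omega)])
        · exact c3 w hw'
      · intro i hi
        rcases c4 i hi with hold | ⟨w, hw, hwi⟩
        · by_cases hij : i = nrm n v
          · exact Or.inr ⟨v, List.mem_cons_self, hij.symm⟩
          · rw [vget_set_ne _ _ _ _ hij] at hold; exact Or.inl hold
        · exact Or.inr ⟨w, List.mem_cons_of_mem _ hw, hwi⟩
      · intro h; rw [h] at hs2; exact absurd hs2 (by simp)
      · exact Or.inr ⟨hs2, by omega⟩
    · have htrue : vget vis (nrm n v) = true := by
        cases h : vget vis (nrm n v)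
        · exact absurd h hcase
        · rfl
      have hunfold : sweepRow (vis, c) (v :: row) = sweepRow (vis, c) row := by
        simp only [sweepRow, List.foldl_cons, hbridge, htrue]
        simp
      obtain ⟨c1, c2, c3, c4, c5, c6, c7⟩ := ih hrow' vis c hlen
      rw [hunfold]
      refine ⟨c1, c2, ?_, ?_, c5, c6, c7⟩
      · intro w hw
        rcases List.mem_cons.mp hw with rfl | hw'
        · exact c2 _ htrue
        · exact c3 w hw'
      · intro i hi
        rcases c4 i hi with hold | ⟨w, hw, hwi⟩
        · exact Or.inl hold
        · exact Or.inr ⟨w, List.mem_cons_of_mem _ hw, hwi⟩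

-- ===== B-side: one pass =====
lemma sweep_spec {adjList : List (List Int)}
    (hn : 0 < adjList.length)
    (hB : ∀ row ∈ adjList, ∀ v ∈ row, -(adjList.length : Int) ≤ v ∧ v < (adjList.length : Int))
    (vis : List Bool) (hlen : vis.length = adjList.length)
    (hs : ∀ i, vget vis i = true → Reach adjList i) :
    (sweep adjList vis).1.length = adjList.length ∧
    (∀ i, vget vis i = true → vget (sweep adjList vis).1 i = true) ∧
    (∀ i, vget (sweep adjList vis).1 i = true → Reach adjList i) ∧
    ((sweep adjList vis).2 = false →
      (sweep adjList vis).1 = vis ∧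
      ∀ x, x < adjList.length → vget vis x = true →
        ∀ v ∈ nbrs adjList x, vget vis v = true) ∧
    ((sweep adjList vis).2 = true →
      (sweep adjList vis).1.count false < vis.count false) := by
  have hfold : ∀ (us : List Int),
      (∀ u ∈ us, -(adjList.length : Int) ≤ u ∧ u < (adjList.length : Int)) →
      ∀ (vis : List Bool) (c : Bool), vis.length = adjList.length →
      ((us.foldl (fun s u =>
          if PySem.List.pyGetD s.1 u false = true then
            sweepRow s (PySem.List.pyGetD adjList u []) else s) (vis, c)).1.length
          = adjList.length ∧
        (∀ i, vget vis i = true → vget ((us.foldl (fun s u =>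
          if PySem.List.pyGetD s.1 u false = true then
            sweepRow s (PySem.List.pyGetD adjList u []) else s) (vis, c)).1) i = true) ∧
        ((∀ i, vget vis i = true → Reach adjList i) →
          ∀ i, vget ((us.foldl (fun s u =>
          if PySem.List.pyGetD s.1 u false = true then
            sweepRow s (PySem.List.pyGetD adjList u []) else s) (vis, c)).1) i = true →
            Reach adjList i) ∧
        ((us.foldl (fun s u =>
          if PySem.List.pyGetD s.1 u false = true then
            sweepRow s (PySem.List.pyGetD adjList u []) else s) (vis, c)).1.count false
            ≤ vis.count false) ∧
        ((us.foldl (fun s u =>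
          if PySem.List.pyGetD s.1 u false = true then
            sweepRow s (PySem.List.pyGetD adjList u []) else s) (vis, c)).2 = c ∨
          ((us.foldl (fun s u =>
          if PySem.List.pyGetD s.1 u false = true then
            sweepRow s (PySem.List.pyGetD adjList u []) else s) (vis, c)).2 = true ∧
           (us.foldl (fun s u =>
          if PySem.List.pyGetD s.1 u false = true then
            sweepRow s (PySem.List.pyGetD adjList u []) else s) (vis, c)).1.count false
            < vis.count false)) ∧
        ((us.foldl (fun s u =>
          if PySem.List.pyGetD s.1 u false = true then
            sweepRow s (PySem.List.pyGetD adjList u []) else s) (vis, c)).2 = false →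
          (us.foldl (fun s u =>
          if PySem.List.pyGetD s.1 u false = true then
            sweepRow s (PySem.List.pyGetD adjList u []) else s) (vis, c)).1 = vis ∧ c = false ∧
          ∀ u ∈ us, vget vis (nrm adjList.length u) = true →
            ∀ v ∈ nbrs adjList (nrm adjList.length u), vget vis v = true)) := by
    intro us
    induction us with
    | nil =>
      intro _ vis c hl
      exact ⟨hl, fun i h => h, fun hs i h => hs i h, le_refl _, Or.inl rfl,
        fun h => ⟨rfl, h, by simp⟩⟩
    | cons u us ihu =>
      intro hus vis c hl
      obtain ⟨hu1, hu2⟩ := hus u List.mem_cons_self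
      have hus' : ∀ w ∈ us, -(adjList.length : Int) ≤ w ∧ w < (adjList.length : Int) :=
        fun w hw => hus w (List.mem_cons_of_mem _ hw)
      have hun : nrm adjList.length u < adjList.length := nrm_lt hu1 hu2
      have hbridge : PySem.List.pyGetD vis u false = vget vis (nrm adjList.length u) :=
        getD_bridge vis hl u hu1 hu2 false
      have hrowdef : PySem.List.pyGetD adjList u []
          = adjList.getD (nrm adjList.length u) [] := getD_bridge adjList rfl u hu1 hu2 []
      have hrowB : ∀ v ∈ PySem.List.pyGetD adjList u [],
          -(adjList.length : Int) ≤ v ∧ v < (adjList.length : Int) := by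
        intro v hv
        rw [hrowdef] at hv
        exact hB _ (row_mem hun) v hv
      have hnbrs : nbrs adjList (nrm adjList.length u)
          = (PySem.List.pyGetD adjList u []).map (nrm adjList.length) := by
        rw [nbrs, ← hrowdef]
      simp only [List.foldl_cons, hbridge]
      by_cases hcond : vget vis (nrm adjList.length u) = true
      · rw [if_pos hcond]
        obtain ⟨r1, r2, r3, r4, r5, r6, r7⟩ :=
          rowB_spec (PySem.List.pyGetD adjList u []) hrowB vis c hl
        have hsplit : sweepRow (vis, c) (PySem.List.pyGetD adjList u [])
            = ((sweepRow (vis, c) (PySem.List.pyGetD adjList u [])).1,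
               (sweepRow (vis, c) (PySem.List.pyGetD adjList u [])).2) := rfl
        rw [hsplit]
        obtain ⟨c1, c2, c3, c4, c5, c6⟩ :=
          ihu hus' (sweepRow (vis, c) (PySem.List.pyGetD adjList u [])).1
            (sweepRow (vis, c) (PySem.List.pyGetD adjList u [])).2 r1
        refine ⟨c1, fun i h => c2 i (r2 i h), ?_, by omega, ?_, ?_⟩
        · intro hs i h
          refine c3 ?_ i h
          intro j hj
          rcases r4 j hj with hold | ⟨w, hw, hwj⟩
          · exact hs j hold
          · exact hwj ▸ Reach.step _ _ (hs _ hcond)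
              (by rw [hnbrs]; exact List.mem_map_of_mem hw)
        · rcases c5 with heq | ⟨ht, hlt⟩
          · rcases r6 with heq' | ⟨ht', hlt'⟩
            · exact Or.inl (heq.trans heq')
            · exact Or.inr ⟨heq.trans ht', by omega⟩
          · exact Or.inr ⟨ht, by omega⟩
        · intro hfin
          obtain ⟨hfe, hrc, hcl⟩ := c6 hfin
          obtain ⟨hre, hcf⟩ := r5 hrc
          refine ⟨by rw [hfe, hre], hcf, ?_⟩
          intro w hw hwt
          rcases List.mem_cons.mp hw with rfl | hw'
          · intro v hv
            rw [hnbrs] at hv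
            rcases List.mem_map.mp hv with ⟨w', hw', rfl⟩
            have := r3 w' hw'
            rwa [hre] at this
          · intro v hv
            have := hcl w hw' (by rwa [hre]) v hv
            rwa [hre] at this
      · rw [if_neg hcond]
        obtain ⟨c1, c2, c3, c4, c5, c6⟩ := ihu hus' vis c hl
        refine ⟨c1, c2, c3, c4, c5, ?_⟩
        intro hfin
        obtain ⟨hfe, hcf, hcl⟩ := c6 hfin
        refine ⟨hfe, hcf, ?_⟩
        intro w hw hwt
        rcases List.mem_cons.mp hw with rfl | hw'
        · exact absurd hwt hcond
        · exact hcl w hw' hwt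
  have hrange : ∀ u ∈ PySem.List.pyRange 0 (adjList.length : Int) 1,
      -(adjList.length : Int) ≤ u ∧ u < (adjList.length : Int) := by
    intro u hu
    rw [PySem.List.mem_pyRange_one] at hu
    omega
  unfold sweep
  obtain ⟨c1, c2, c3, c4, c5, c6⟩ :=
    hfold (PySem.List.pyRange 0 (adjList.length : Int) 1) hrange vis false hlen
  refine ⟨c1, c2, c3 hs, ?_, ?_⟩
  · intro hfin
    obtain ⟨hfe, _, hcl⟩ := c6 hfin
    refine ⟨hfe, ?_⟩
    intro x hx hxt v hv
    have hxmem : (x : Int) ∈ PySem.List.pyRange 0 (adjList.length : Int) 1 := by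
      rw [PySem.List.mem_pyRange_one]
      omega
    have hnx : nrm adjList.length (x : Int) = x := by
      rw [nrm, if_neg (by omega : ¬ ((x : Int) < 0))]
      omega
    have := hcl (x : Int) hxmem (by rwa [hnx])
    rw [hnx] at this
    exact this v hv
  · intro htrue
    rcases c5 with heq | ⟨_, hlt⟩
    · rw [htrue] at heq; exact absurd heq.symm (by simp)
    · exact hlt

-- ===== B-side: the while-changed loop =====
lemma loopB_spec {adjList : List (List Int)}
    (hn : 0 < adjList.length)
    (hB : ∀ row ∈ adjList, ∀ v ∈ row, -(adjList.length : Int) ≤ v ∧ v < (adjList.length : Int)) :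
    ∀ (fuel : ℕ) (vis : List Bool),
      vis.length = adjList.length →
      vis.count false < fuel →
      vget vis 0 = true →
      (∀ i, vget vis i = true → Reach adjList i) →
      ((sweepLoop adjList fuel vis).length = adjList.length ∧
        ∀ i, vget (sweepLoop adjList fuel vis) i = true ↔ Reach adjList i) := by
  intro fuel
  induction fuel with
  | zero => intro vis _ hcnt _ _; omega
  | succ fuel ih =>
    intro vis hlen hcnt hI0 hsound
    obtain ⟨g1, g2, g3, g4, g5⟩ := sweep_spec hn hB vis hlen hsound
    have hred : sweepLoop adjList (fuel + 1) vis
        = if (sweep adjList vis).2 then sweepLoop adjList fuel (sweep adjList vis).1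
          else (sweep adjList vis).1 := rfl
    rw [hred]
    by_cases hch : (sweep adjList vis).2 = true
    · rw [if_pos hch]
      exact ih (sweep adjList vis).1 g1 (by have := g5 hch; omega) (g2 0 hI0) g3
    · rw [if_neg hch]
      obtain ⟨hfe, hcl⟩ := g4 (by simpa using hch)
      rw [hfe]
      refine ⟨hlen, fun i => ⟨fun h => hsound i h, fun h => ?_⟩⟩
      induction h with
      | zero => exact hI0
      | step u v hu hv ihv =>
        exact hcl u (by have := vget_true_lt vis u ihv; omega) ihv v hv

-- facts about the common initial vector
lemma init_facts (n : ℕ) (hn : 0 < n) :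
    ((List.replicate n false).set 0 true).length = n ∧
    vget ((List.replicate n false).set 0 true) 0 = true ∧
    ((List.replicate n false).set 0 true).count false + 1 = n ∧
    (∀ i, vget ((List.replicate n false).set 0 true) i = true → i = 0) := by
  obtain ⟨m, rfl⟩ : ∃ m, n = m + 1 := ⟨n - 1, by omega⟩
  have hrep : (List.replicate (m + 1) false).set 0 true
      = true :: List.replicate m false := by
    rw [List.replicate_succ]
    rfl
  rw [hrep]
  refine ⟨by simp, rfl, ?_, ?_⟩
  · simp
  · intro i hi
    cases i with
    | zero => rfl
    | succ j =>
      exfalso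
      have : vget (true :: List.replicate m false) (j + 1)
          = (List.replicate m false).getD j false := rfl
      rw [this] at hi
      rcases Nat.lt_or_ge j m with hj | hj
      · rw [List.getD_eq_getElem?_getD, List.getElem?_eq_getElem (by simpa using hj)] at hi
        simp at hi
      · rw [List.getD_eq_getElem?_getD,
          List.getElem?_eq_none_iff.mpr (by simpa using hj)] at hi
        simp at hi

-- ===== VERDICT (by name: the statement is the Claim_ definition above) =====
lemma vget_eq_getElem (xs : List Bool) (i : ℕ) (h : i < xs.length) : vget xs i = xs[i] := by
  simp [vget, List.getD_eq_getElem?_getD, List.getElem?_eq_getElem h]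

-- ===== VERDICT (by name: the statement is the Claim_ definition above) =====
theorem bfs_spec : Claim_equal_bfs := by
  intro adjList _ hPre
  obtain ⟨hne, hB⟩ := hPre
  have hn : 0 < adjList.length := List.length_pos_iff.mpr hne
  have hset : PySem.List.pySetD (List.replicate adjList.length false) 0 true
      = (List.replicate adjList.length false).set 0 true := by
    rw [setD_bridge (n := adjList.length) (List.replicate adjList.length false) (by simp) 0 (by omega)
      (by exact_mod_cast hn) true]
    rfl
  obtain ⟨i1, i2, i3, i4⟩ := init_facts adjList.length hn
  have hsound0 : ∀ i, vget ((List.replicate adjList.length false).set 0 true) i = true →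
      Reach adjList i := by
    intro i hi
    rw [i4 i hi]
    exact Reach.zero
  obtain ⟨lA, hA⟩ := loopA_spec hn hB adjList.length
    ((List.replicate adjList.length false).set 0 true) [0] i1 (by simp; omega) i2 hsound0
    (by intro u hu; simp at hu; subst hu; constructor <;> omega)
    (by intro u hu; simp at hu; subst hu;
        have : nrm adjList.length 0 = 0 := rfl
        rw [this]; exact Reach.zero)
    (by intro x hx
        exact Or.inl ⟨0, by simp, by rw [i4 x hx]; rfl⟩)
  obtain ⟨lB, hBB⟩ := loopB_spec hn hB adjList.length
    ((List.replicate adjList.length false).set 0 true) i1 (by omega) i2 hsound0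
  have hlists : bfsLoop adjList adjList.length
        ((List.replicate adjList.length false).set 0 true) [0]
      = sweepLoop adjList adjList.length
        ((List.replicate adjList.length false).set 0 true) := by
    apply List.ext_getElem (by rw [lA, lB])
    intro i h1 h2
    have hiff : (bfsLoop adjList adjList.length
          ((List.replicate adjList.length false).set 0 true) [0])[i] = true
        ↔ (sweepLoop adjList adjList.length
          ((List.replicate adjList.length false).set 0 true))[i] = true := by
      rw [← vget_eq_getElem _ _ h1, ← vget_eq_getElem _ _ h2]
      exact (hA i).trans (hBB i).symm
    cases ha : (bfsLoop adjList adjList.length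
        ((List.replicate adjList.length false).set 0 true) [0])[i] <;>
      cases hb : (sweepLoop adjList adjList.length
        ((List.replicate adjList.length false).set 0 true))[i]
    · rfl
    · exact absurd (hiff.mpr hb) (by rw [ha]; simp)
    · exact absurd (hiff.mp ha) (by rw [hb]; simp)
    · rfl
  show bfs adjList = bfs_alt adjList
  rw [bfs, bfs_alt]
  simp only [hset, hlists]
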